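-- pv_equiv track=rewrite | github.com/aganezov/ont_qc_mcp | ont_qc_mcp/parsers.py | _parse_angle_bracket_fields
-- ===== SOURCE A (Python) =====
-- def _parse_angle_bracket_fields(value: str) -> dict[str, str]:
--     """
--     Parse VCF-style key/value lists inside angle brackets, respecting quoted commas.
--     """
--     if value.startswith("<") and value.endswith(">"):
--         value = value[1:-1]
--
--     fields: dict[str, str] = {}
--     current: list[str] = []
--     in_quotes = False
--
--     for char in value:
--         if char == '"' and (not current or current[-1] != "\\"):
--             in_quotes = not in_quotes
--         if char == "," and not in_quotes:
--             token = "".join(current).strip()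
--             if token:
--                 key, _, val = token.partition("=")
--                 fields[key] = val.strip('"')
--             current = []
--             continue
--         current.append(char)
--
--     token = "".join(current).strip()
--     if token:
--         key, _, val = token.partition("=")
--         fields[key] = val.strip('"')
--
--     return fields
-- ===== SOURCE B (Python) =====
-- def _find_unquoted_comma(s):
--     """Index of the first comma outside quotes in s, or -1."""
--     in_q = False
--     prev = None
--     for i, ch in enumerate(s):
--         if ch == '"' and (prev is None or prev != "\\"):
--             in_q = not in_q
--         elif ch == "," and not in_q:
--             return i
--         prev = ch
--     return -1
--
--
-- def _split_unquoted_commas(s):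
--     """Split s at each comma outside quotes by repeatedly cutting at the first one."""
--     tokens = []
--     while True:
--         i = _find_unquoted_comma(s)
--         if i < 0:
--             tokens.append(s)
--             return tokens
--         tokens.append(s[:i])
--         s = s[i + 1:]
--
--
-- def _parse_angle_bracket_fields(value: str) -> dict[str, str]:
--     if value.startswith("<") and value.endswith(">"):
--         value = value[1:-1]
--     fields: dict[str, str] = {}
--     for token in _split_unquoted_commas(value):
--         token = token.strip()
--         if token:
--             key, _, val = token.partition("=")
--             fields[key] = val.strip('"')
--     return fields
-- ===== Notes on version B (the rewrite author's own statement) =====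
-- stated objective: alternative
-- what changed: A builds the dict inline in one accumulate-and-flush character scan with a per-token character buffer; B first splits the string into tokens by repeatedly cutting it at the first comma outside quotes (a find-then-slice loop), then fills the dict in a separate pass over the token list.
import Mathlib
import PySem

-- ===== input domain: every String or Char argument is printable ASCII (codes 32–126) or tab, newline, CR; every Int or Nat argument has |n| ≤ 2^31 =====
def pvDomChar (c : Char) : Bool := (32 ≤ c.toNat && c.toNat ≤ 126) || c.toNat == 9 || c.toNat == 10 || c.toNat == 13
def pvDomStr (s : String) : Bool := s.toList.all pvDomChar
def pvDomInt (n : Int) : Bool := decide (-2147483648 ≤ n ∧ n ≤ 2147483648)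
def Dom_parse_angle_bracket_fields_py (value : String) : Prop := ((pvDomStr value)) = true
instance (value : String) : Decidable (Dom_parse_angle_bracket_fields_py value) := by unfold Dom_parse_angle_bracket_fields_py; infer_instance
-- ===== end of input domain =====

-- B replaces A's inline accumulate-and-flush scan by a split phase (repeatedly cutting the
-- string at the first comma outside quotes) followed by a separate token→dict pass; objective: alternative.

-- ===== PORT A =====

-- token.partition("=") for the single-char separator "=": (before, after-first-'='); both parts "" when absent (exact hand port)
def pvPartEq (t : List Char) : List Char × List Char :=
  (t.takeWhile (fun c => c ≠ '='), (t.dropWhile (fun c => c ≠ '=')).drop 1)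

-- the repeated 'token = "".join(current).strip(); if token: key,_,val = token.partition("="); fields[key] = val.strip('"')'
def pvFlushA (fields : PySem.Dict String String) (current : List Char) : PySem.Dict String String :=
  let token := PySem.Chars.strip current
  if token ≠ [] then
    let kv := pvPartEq token
    fields.insert (String.ofList kv.1) (String.ofList (PySem.Chars.stripChars kv.2 ['"']))
  else fields

def pvStepA (st : PySem.Dict String String × List Char × Bool) (c : Char) :
    PySem.Dict String String × List Char × Bool :=
  let (fields, current, in_quotes) := st
  let in_quotes := if c = '"' ∧ (current = [] ∨ current.getLast? ≠ some '\\') then !in_quotes else in_quotes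
  if c = ',' ∧ in_quotes = false then (pvFlushA fields current, [], in_quotes)
  else (fields, current ++ [c], in_quotes)

def parse_angle_bracket_fields_py (value : String) : List (String × String) :=
  let v := value.toList
  let v := if PySem.Chars.startswith v ['<'] && PySem.Chars.endswith v ['>']
           then PySem.Chars.slice v (some 1) (some (-1)) else v
  let st := v.foldl pvStepA (PySem.Dict.empty, [], false)
  (pvFlushA st.1 st.2.1).items

-- ===== PORT B =====

-- _find_unquoted_comma: first comma outside quotes (prev carries the previous character)
def pvFindB : List Char → Option Char → Nat → Bool → Int
  | [], _, _, _ => -1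
  | c :: rest, prev, i, in_q =>
    if c = '"' ∧ (prev = none ∨ prev ≠ some '\\') then pvFindB rest (some c) (i + 1) (!in_q)
    else if c = ',' ∧ in_q = false then (i : Int)
    else pvFindB rest (some c) (i + 1) in_q

theorem pvFindB_nonneg_ne_nil : ∀ (s : List Char) (p : Option Char) (i : Nat) (q : Bool),
    ¬ pvFindB s p i q < 0 → s ≠ [] := by
  intro s p i q h
  cases s with
  | nil => simp [pvFindB] at h
  | cons c rest => simp

-- _split_unquoted_commas: repeatedly cut at the first unquoted comma
def pvSplitB (s : List Char) : List (List Char) :=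
  let i := pvFindB s none 0 false
  if h : i < 0 then [s]
  else PySem.Chars.slice s none (some i) :: pvSplitB (PySem.Chars.slice s (some (i + 1)) none)
termination_by s.length
decreasing_by
  have hs : s ≠ [] := pvFindB_nonneg_ne_nil s none 0 false h
  rw [PySem.Chars.slice_eq_listSlice, PySem.List.slice_from s (by omega : (0:Int) ≤ pvFindB s none 0 false + 1)]
  have hlen : 0 < s.length := List.length_pos_iff.mpr hs
  simp [List.length_drop]
  omega

-- the per-token body of B's second pass
def pvTokStep (fields : PySem.Dict String String) (tok : List Char) : PySem.Dict String String :=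
  let token := PySem.Chars.strip tok
  if token ≠ [] then
    let kv := pvPartEq token
    fields.insert (String.ofList kv.1) (String.ofList (PySem.Chars.stripChars kv.2 ['"']))
  else fields

def parse_angle_bracket_fields_py_alt (value : String) : List (String × String) :=
  let v := value.toList
  let v := if PySem.Chars.startswith v ['<'] && PySem.Chars.endswith v ['>']
           then PySem.Chars.slice v (some 1) (some (-1)) else v
  let fields := (pvSplitB v).foldl pvTokStep PySem.Dict.empty
  fields.items

-- ===== PRECONDITION & SPEC =====
def Spec_parse_angle_bracket_fields_py (value : String) (out : List (String × String)) : Prop := out = parse_angle_bracket_fields_py_alt value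
instance (value : String) (out : List (String × String)) : Decidable (Spec_parse_angle_bracket_fields_py value out) := by unfold Spec_parse_angle_bracket_fields_py; infer_instance

-- ===== CLAIM (what is proved, stated in full; the proofs are below) =====
def Claim_equal_parse_angle_bracket_fields_py : Prop := ∀ (value : String), Dom_parse_angle_bracket_fields_py value → Spec_parse_angle_bracket_fields_py value (parse_angle_bracket_fields_py value)

-- ===== LEMMAS AND PROOFS =====

-- proof-only: the index pvFindB returns, as an Option Nat relative to the current position
def pvFindN : List Char → Option Char → Bool → Option Nat
  | [], _, _ => none
  | c :: rest, prev, in_q =>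
    if c = '"' ∧ (prev = none ∨ prev ≠ some '\\') then (pvFindN rest (some c) (!in_q)).map (· + 1)
    else if c = ',' ∧ in_q = false then some 0
    else (pvFindN rest (some c) in_q).map (· + 1)

theorem pvCondFind (p : Option Char) : (p = none ∨ p ≠ some '\\') ↔ (p ≠ some '\\') := by
  cases p <;> simp

theorem pvCondCur (cur : List Char) : (cur = [] ∨ cur.getLast? ≠ some '\\') ↔ (cur.getLast? ≠ some '\\') := by
  constructor
  · rintro (rfl | h) <;> simp_all
  · intro h; right; exact h

theorem pvFindB_eq_findN : ∀ (s : List Char) (p : Option Char) (i : Nat) (q : Bool),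
    pvFindB s p i q = match pvFindN s p q with
      | none => -1
      | some j => ((i + j : Nat) : Int) := by
  intro s
  induction s with
  | nil => intro p i q; simp [pvFindB, pvFindN]
  | cons c rest ih =>
    intro p i q
    simp only [pvFindB, pvFindN]
    split_ifs with h1 h2
    · rw [ih]
      cases hr : pvFindN rest (some c) (!q) with
      | none => simp
      | some j => simp; ring
    · simp
    · rw [ih]
      cases hr : pvFindN rest (some c) q with
      | none => simp
      | some j => simp; ring

theorem scanA_none : ∀ (s cur : List Char) (q : Bool) (fields : PySem.Dict String String),
    pvFindN s cur.getLast? q = none →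
    (s.foldl pvStepA (fields, cur, q)).1 = fields ∧
    (s.foldl pvStepA (fields, cur, q)).2.1 = cur ++ s := by
  intro s
  induction s with
  | nil => intro cur q fields _; simp
  | cons c rest ih =>
    intro cur q fields hn
    simp only [pvFindN, pvCondFind] at hn
    simp only [List.foldl_cons, pvStepA, pvCondCur]
    by_cases h1 : c = '"' ∧ cur.getLast? ≠ some '\\'
    · rw [if_pos h1] at hn ⊢
      rw [if_neg (by rintro ⟨hc, -⟩; rw [h1.1] at hc; exact absurd hc (by decide))]
      have := ih (cur ++ [c]) (!q) fields (by simpa using hn)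
      simpa using this
    · rw [if_neg h1] at hn ⊢
      by_cases h2 : c = ',' ∧ q = false
      · rw [if_pos h2] at hn; simp at hn
      · rw [if_neg h2] at hn ⊢
        have := ih (cur ++ [c]) q fields (by simpa using hn)
        simpa using this

theorem scanA_some : ∀ (s : List Char) (i : Nat) (cur : List Char) (q : Bool)
    (fields : PySem.Dict String String),
    pvFindN s cur.getLast? q = some i →
    s.foldl pvStepA (fields, cur, q) =
      (s.drop (i + 1)).foldl pvStepA (pvFlushA fields (cur ++ s.take i), [], false) := by
  intro s
  induction s with
  | nil => intro i cur q fields hn; simp [pvFindN] at hn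
  | cons c rest ih =>
    intro i cur q fields hn
    simp only [pvFindN, pvCondFind] at hn
    simp only [List.foldl_cons, pvStepA, pvCondCur]
    by_cases h1 : c = '"' ∧ cur.getLast? ≠ some '\\'
    · rw [if_pos h1] at hn ⊢
      rw [if_neg (by rintro ⟨hc, -⟩; rw [h1.1] at hc; exact absurd hc (by decide))]
      obtain ⟨j, hj, rfl⟩ := Option.map_eq_some_iff.mp hn
      have := ih j (cur ++ [c]) (!q) fields (by simpa using hj)
      simpa [List.append_assoc] using this
    · rw [if_neg h1] at hn ⊢
      by_cases h2 : c = ',' ∧ q = false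
      · rw [if_pos h2] at hn ⊢
        simp only [Option.some.injEq] at hn
        subst hn
        simp [h2.2]
      · rw [if_neg h2] at hn ⊢
        obtain ⟨j, hj, rfl⟩ := Option.map_eq_some_iff.mp hn
        have := ih j (cur ++ [c]) q fields (by simpa using hj)
        simpa [List.append_assoc] using this

theorem main_equiv : ∀ (s : List Char) (fields : PySem.Dict String String),
    pvFlushA (s.foldl pvStepA (fields, [], false)).1 (s.foldl pvStepA (fields, [], false)).2.1 =
      (pvSplitB s).foldl pvTokStep fields := by
  intro s
  induction s using pvSplitB.induct with
  | case1 s i hneg =>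
    intro fields
    have hneg' : pvFindB s none 0 false < 0 := hneg
    rw [pvSplitB]
    simp only [dif_pos hneg', List.foldl_cons, List.foldl_nil]
    have hF := pvFindB_eq_findN s none 0 false
    have hn : pvFindN s none false = none := by
      cases hr : pvFindN s none false with
      | none => rfl
      | some j =>
        rw [hr] at hF; simp at hF
        have h0 : (0:Int) ≤ (j:Int) := Int.natCast_nonneg j
        omega
    have := scanA_none s [] false fields (by simpa using hn)
    rw [this.1, this.2]
    simp [pvFlushA, pvTokStep]
  | case2 s i hneg ih =>
    intro fields
    have hneg' : ¬ pvFindB s none 0 false < 0 := hneg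
    have ih' : ∀ (fields : PySem.Dict String String),
        pvFlushA (((PySem.Chars.slice s (some (pvFindB s none 0 false + 1)) none).foldl pvStepA (fields, [], false)).1)
            (((PySem.Chars.slice s (some (pvFindB s none 0 false + 1)) none).foldl pvStepA (fields, [], false)).2.1) =
          (pvSplitB (PySem.Chars.slice s (some (pvFindB s none 0 false + 1)) none)).foldl pvTokStep fields := ih
    rw [pvSplitB]
    simp only [dif_neg hneg', List.foldl_cons]
    have hF := pvFindB_eq_findN s none 0 false
    obtain ⟨j, hj⟩ : ∃ j, pvFindN s none false = some j := by
      cases hr : pvFindN s none false with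
      | none => rw [hr] at hF; simp at hF; omega
      | some j => exact ⟨j, rfl⟩
    rw [hj] at hF
    simp only [Nat.zero_add] at hF
    have h1 : PySem.Chars.slice s none (some (pvFindB s none 0 false)) = s.take j := by
      rw [hF]; simp [PySem.Chars.slice_eq_listSlice, PySem.List.slice_to_natCast]
    have h2 : PySem.Chars.slice s (some (pvFindB s none 0 false + 1)) none = s.drop (j + 1) := by
      rw [hF, PySem.Chars.slice_eq_listSlice, PySem.List.slice_from s (by omega : (0:Int) ≤ (j:Int) + 1)]
      have ht : ((j:Int) + 1).toNat = j + 1 := by omega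
      rw [ht]
    have hs := scanA_some s j [] false fields (by simpa using hj)
    simp only [List.nil_append] at hs
    rw [h2] at ih'
    rw [hs, ih', h1, h2]
    rfl

-- ===== VERDICT (by name: the statement is the Claim_ definition above) =====
theorem parse_angle_bracket_fields_py_spec : Claim_equal_parse_angle_bracket_fields_py := by
  intro value _
  unfold Spec_parse_angle_bracket_fields_py parse_angle_bracket_fields_py parse_angle_bracket_fields_py_alt
  simp only []
  rw [main_equiv]
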